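-- pv_equiv track=rewrite | github.com/kwonssshyeon/2023_haedal_Algorithm | 김강민/2024/03/0306/181900.py | solution
-- ===== SOURCE A (Python) =====
-- def solution(my_string, indices):
--     answer = ''
--     str = []
--
--     for i in range(len(my_string)):
--         if i not in indices:
--             str.append(i)
--             answer += my_string[i]
--
--     return answer
-- ===== SOURCE B (Python) =====
-- def solution(my_string, indices):
--     n = len(my_string)
--     cuts = sorted({i for i in indices if 0 <= i < n})
--     parts = []
--     prev = 0
--     for idx in cuts:
--         parts.append(my_string[prev:idx])
--         prev = idx + 1
--     parts.append(my_string[prev:])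
--     return ''.join(parts)
-- ===== Notes on version B (the rewrite author's own statement) =====
-- stated objective: faster
-- what changed: Instead of scanning every character and testing membership in the raw indices list, B collects the valid removal positions into a sorted de-duplicated set once and concatenates the surviving slices between consecutive cuts.
import Mathlib
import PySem

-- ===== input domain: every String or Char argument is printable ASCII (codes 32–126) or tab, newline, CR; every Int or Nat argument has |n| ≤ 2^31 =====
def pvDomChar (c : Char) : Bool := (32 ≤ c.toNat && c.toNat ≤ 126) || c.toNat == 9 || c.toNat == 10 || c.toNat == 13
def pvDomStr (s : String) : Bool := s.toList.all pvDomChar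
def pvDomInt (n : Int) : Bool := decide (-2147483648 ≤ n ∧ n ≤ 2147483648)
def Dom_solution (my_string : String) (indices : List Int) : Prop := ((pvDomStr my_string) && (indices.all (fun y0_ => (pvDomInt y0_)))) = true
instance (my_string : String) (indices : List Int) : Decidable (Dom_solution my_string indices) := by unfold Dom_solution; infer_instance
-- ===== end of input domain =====

-- B replaces A's per-character membership scan by concatenating the string slices
-- that survive between the sorted, de-duplicated valid removal positions (faster).

-- ===== PORT A =====
def solution (my_string : String) (indices : List Int) : String :=
  let cs := my_string.toList
  let st := (PySem.List.pyRange 0 (PySem.Str.len my_string) 1).foldl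
    (fun (acc : List Char × List Int) i =>
      if !(indices.contains i) then
        (acc.1 ++ [PySem.List.pyGetD cs i ' '], acc.2 ++ [i])
      else acc)
    ([], [])
  String.ofList st.1

-- ===== PORT B =====
def solution_alt (my_string : String) (indices : List Int) : String :=
  let cs := my_string.toList
  let n : Int := PySem.Str.len my_string
  let cuts : List Int :=
    PySem.List.sorted (PySem.Set.ofList (indices.filter (fun i => decide (0 ≤ i ∧ i < n)))) (fun x => x) false
  let st := cuts.foldl
    (fun (st : List (List Char) × Int) idx =>
      (st.1 ++ [PySem.List.slice cs (some st.2) (some idx)], idx + 1))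
    ([], 0)
  String.ofList (st.1 ++ [PySem.List.slice cs (some st.2) none]).flatten

-- ===== PRECONDITION & SPEC =====
def Spec_solution (my_string : String) (indices : List Int) (out : String) : Prop := out = solution_alt my_string indices
instance (my_string : String) (indices : List Int) (out : String) : Decidable (Spec_solution my_string indices out) := by unfold Spec_solution; infer_instance

-- ===== CLAIM (what is proved, stated in full; the proofs are below) =====
def Claim_equal_solution : Prop := ∀ (my_string : String) (indices : List Int), Dom_solution my_string indices → Spec_solution my_string indices (solution my_string indices)

-- ===== LEMMAS AND PROOFS =====

-- A contiguous index range mapped through pyGetD is the corresponding slice.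
theorem pv_map_get_slice (cs : List Char) (a b : Int) (h0 : 0 ≤ a) (hab : a ≤ b)
    (hb : b ≤ (cs.length : Int)) :
    (PySem.List.pyRange a b 1).map (fun i => PySem.List.pyGetD cs i ' ')
      = PySem.List.slice cs (some a) (some b) := by
  have hall := PySem.List.map_pyGetD_pyRange' cs ' ' h0
  have hallb := PySem.List.map_pyGetD_pyRange' cs ' ' (le_trans h0 hab)
  rw [PySem.List.pyRange_one_append a b (cs.length : Int) hab hb, List.map_append, hallb] at hall
  have hlen : ((PySem.List.pyRange a b 1).map (fun i => PySem.List.pyGetD cs i ' ')).length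
      = (b - a).toNat := by
    simp [PySem.List.length_pyRange_one]
  have htake : (cs.drop a.toNat).take (b - a).toNat
      = (PySem.List.pyRange a b 1).map (fun i => PySem.List.pyGetD cs i ' ') := by
    rw [← hall, ← hlen, List.take_left]
  rw [PySem.List.slice_toNat cs h0 (le_trans h0 hab), ← htake]
  congr 1
  omega

-- The span-concatenation fold over sorted in-range cuts equals the filtered scan.
theorem pv_span_fold (cs : List Char) (cuts : List Int) :
    ∀ (prev : Int) (parts : List (List Char)), 0 ≤ prev →
    cuts.Pairwise (· < ·) → (∀ c ∈ cuts, prev ≤ c ∧ c < (cs.length : Int)) →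
    ((cuts.foldl
        (fun (st : List (List Char) × Int) idx =>
          (st.1 ++ [PySem.List.slice cs (some st.2) (some idx)], idx + 1))
        (parts, prev)).1 ++
      [PySem.List.slice cs (some (cuts.foldl
        (fun (st : List (List Char) × Int) idx =>
          (st.1 ++ [PySem.List.slice cs (some st.2) (some idx)], idx + 1))
        (parts, prev)).2) none]).flatten
    = parts.flatten ++
      ((PySem.List.pyRange prev (cs.length : Int) 1).filter
        (fun i => !(cuts.contains i))).map (fun i => PySem.List.pyGetD cs i ' ') := by
  induction cuts with
  | nil =>
    intro prev parts h0 _ _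
    simp only [List.foldl_nil]
    rw [PySem.List.slice_from cs h0]
    have hfil : (PySem.List.pyRange prev (cs.length : Int) 1).filter
        (fun i => !(([] : List Int).contains i)) = PySem.List.pyRange prev (cs.length : Int) 1 := by
      simp
    rw [hfil, PySem.List.map_pyGetD_pyRange' cs ' ' h0]
    simp
  | cons c rest ih =>
    intro prev parts h0 hpair hmem
    have hc := hmem c (List.mem_cons_self)
    have hrest : ∀ r ∈ rest, c < r := (List.pairwise_cons.mp hpair).1
    simp only [List.foldl_cons]
    rw [ih (c + 1) (parts ++ [PySem.List.slice cs (some prev) (some c)]) (by omega)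
        (List.pairwise_cons.mp hpair).2
        (fun r hr => ⟨by have := hrest r hr; omega, (hmem r (List.mem_cons_of_mem c hr)).2⟩)]
    rw [PySem.List.pyRange_one_append prev (c + 1) (cs.length : Int) (by omega) (by omega),
        PySem.List.pyRange_one_succ_right (show prev ≤ c by omega)]
    rw [List.filter_append, List.filter_append, List.map_append, List.map_append]
    have h1 : (PySem.List.pyRange prev c 1).filter (fun i => !((c :: rest).contains i))
        = PySem.List.pyRange prev c 1 := by
      apply List.filter_eq_self.mpr
      intro i hi
      have hib := (PySem.List.mem_pyRange_one).mp hi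
      have hnotc : i ≠ c := by omega
      have hnotr : i ∉ rest := fun hmr => by have := hrest i hmr; omega
      simp [hnotc, hnotr]
    have h2 : ([c] : List Int).filter (fun i => !((c :: rest).contains i)) = [] := by simp
    have h3 : (PySem.List.pyRange (c + 1) (cs.length : Int) 1).filter
          (fun i => !((c :: rest).contains i))
        = (PySem.List.pyRange (c + 1) (cs.length : Int) 1).filter (fun i => !(rest.contains i)) := by
      apply List.filter_congr
      intro i hi
      have hib := (PySem.List.mem_pyRange_one).mp hi
      have hnotc : i ≠ c := by omega
      simp [hnotc]
    rw [h1, h2, h3, pv_map_get_slice cs prev c h0 (by omega) (by omega)]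
    simp

-- ===== VERDICT (by name: the statement is the Claim_ definition above) =====
theorem solution_spec : Claim_equal_solution := by
  intro s indices _
  unfold Spec_solution solution solution_alt
  dsimp only
  -- A side: split the pair fold, then turn the conditional append into filter+map
  have hbody : (fun (acc : List Char × List Int) (i : Int) =>
      if !(indices.contains i) then (acc.1 ++ [PySem.List.pyGetD s.toList i ' '], acc.2 ++ [i]) else acc)
      = (fun (acc : List Char × List Int) (i : Int) =>
        (if !(indices.contains i) then acc.1 ++ [PySem.List.pyGetD s.toList i ' '] else acc.1,
         if !(indices.contains i) then acc.2 ++ [i] else acc.2)) := by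
    funext acc i
    by_cases h : i ∈ indices <;> simp [h]
  rw [hbody,
    PySem.List.foldl_prod_mk
      (f := fun (a : List Char) (i : Int) => if !(indices.contains i) then a ++ [PySem.List.pyGetD s.toList i ' '] else a)
      (g := fun (a : List Int) (i : Int) => if !(indices.contains i) then a ++ [i] else a),
    PySem.List.foldl_append_if]
  -- B side
  set cuts : List Int :=
    PySem.List.sorted (PySem.Set.ofList (indices.filter (fun i => decide (0 ≤ i ∧ i < PySem.Str.len s)))) (fun x => x) false with hcuts
  have hpair : cuts.Pairwise (· < ·) := hcuts ▸ PySem.List.sorted_ofList_pairwise_lt _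
  have hmemcuts : ∀ i, i ∈ cuts ↔ (i ∈ indices ∧ 0 ≤ i ∧ i < (s.toList.length : Int)) := by
    intro i
    rw [hcuts, PySem.List.mem_sorted, PySem.Set.mem_ofList, List.mem_filter]
    simp [PySem.Str.len_eq]
  rw [pv_span_fold s.toList cuts 0 [] le_rfl hpair (fun c hc => by
      have := (hmemcuts c).mp hc; exact ⟨this.2.1, this.2.2⟩)]
  rw [PySem.Str.len_eq]
  have hfil : (PySem.List.pyRange 0 (s.toList.length : Int) 1).filter (fun i => !(cuts.contains i))
      = (PySem.List.pyRange 0 (s.toList.length : Int) 1).filter (fun i => !(indices.contains i)) := by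
    apply List.filter_congr
    intro i hi
    have hib := (PySem.List.mem_pyRange_one).mp hi
    by_cases h : i ∈ indices
    · have : i ∈ cuts := (hmemcuts i).mpr ⟨h, hib.1, hib.2⟩
      simp [h, this]
    · have : i ∉ cuts := fun hc => h ((hmemcuts i).mp hc).1
      simp [h, this]
  rw [hfil]
  simp
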